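-- pv_equiv track=rewrite | github.com/Jaykayy23/EduHive | ml-backend/app/services/pdf_text_cleaner.py | _reconstruct_paragraphs
-- ===== SOURCE A (Python) =====
-- def _reconstruct_paragraphs(text: str) -> str:
--     """Rebuild proper paragraph structure from messy PDF text."""
--     lines = text.splitlines()
--     paragraphs = []
--     current_para = []
--
--     for line in lines:
--         stripped = line.strip()
--         if not stripped:
--             if current_para:
--                 paragraphs.append(" ".join(current_para))
--                 current_para = []
--         else:
--             # Heuristic for paragraph breaks
--             if (current_para and stripped[0].isupper() and
--                 not current_para[-1].endswith(('.', '!', '?'))):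
--                 paragraphs.append(" ".join(current_para))
--                 current_para = [stripped]
--             else:
--                 current_para.append(stripped)
--
--     if current_para:
--         paragraphs.append(" ".join(current_para))
--
--     return "\n\n".join(paragraphs)
-- ===== SOURCE B (Python) =====
-- def _starts_new(prev, cur):
--     """Paragraph-break heuristic between two consecutive non-blank lines."""
--     return cur[0].isupper() and not prev.endswith(('.', '!', '?'))
--
--
-- def _split_blocks(lines):
--     """Split stripped lines into blocks of non-blank lines, blank lines as delimiters."""
--     blocks = []
--     block = []
--     for s in lines:
--         if s:
--             block.append(s)
--         elif block:
--             blocks.append(block)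
--             block = []
--     if block:
--         blocks.append(block)
--     return blocks
--
--
-- def _split_paragraphs(block):
--     """Break one non-empty block into paragraphs by the pairwise heuristic."""
--     groups = [[block[0]]]
--     for prev, cur in zip(block, block[1:]):
--         if _starts_new(prev, cur):
--             groups.append([cur])
--         else:
--             groups[-1].append(cur)
--     return [" ".join(g) for g in groups]
--
--
-- def _reconstruct_paragraphs(text: str) -> str:
--     """Rebuild proper paragraph structure from messy PDF text."""
--     stripped = [line.strip() for line in text.splitlines()]
--     paragraphs = []
--     for block in _split_blocks(stripped):
--         paragraphs.extend(_split_paragraphs(block))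
--     return "\n\n".join(paragraphs)
-- ===== Notes on version B (the rewrite author's own statement) =====
-- stated objective: alternative
-- what changed: B is two-phase: it first splits the stripped lines into blank-separated blocks, then breaks each block into paragraphs with a pairwise zip(block, block[1:]) scan, instead of A's single fold that interleaves blank-line flushing with a current-paragraph accumulator.
import Mathlib
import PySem

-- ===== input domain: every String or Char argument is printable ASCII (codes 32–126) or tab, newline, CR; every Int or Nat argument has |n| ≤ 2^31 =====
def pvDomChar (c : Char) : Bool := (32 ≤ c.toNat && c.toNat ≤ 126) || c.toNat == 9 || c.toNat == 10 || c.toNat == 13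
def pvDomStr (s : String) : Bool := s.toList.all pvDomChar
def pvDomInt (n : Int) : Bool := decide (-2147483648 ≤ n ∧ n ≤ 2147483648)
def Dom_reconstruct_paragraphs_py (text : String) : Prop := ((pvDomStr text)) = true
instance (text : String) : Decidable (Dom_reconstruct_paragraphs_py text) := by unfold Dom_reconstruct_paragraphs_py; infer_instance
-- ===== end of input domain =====

-- B rebuilds the paragraphs in two explicit phases (blank-line block split, then a
-- pairwise paragraph split per block) instead of A's single flush-accumulator fold;
-- objective: alternative decomposition (same asymptotic cost).

-- shared tiny predicates (both Pythons evaluate these very expressions)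
-- s[0].isupper() for a non-empty stripped line s
def pvFirstUpper (s : String) : Bool :=
  match PySem.Str.pyGet? s 0 with
  | some c => PySem.Chars.isupper c
  | none => false

-- prev.endswith(('.', '!', '?'))
def pvEndsSent (prev : String) : Bool :=
  PySem.Str.endswith prev "." || PySem.Str.endswith prev "!" || PySem.Str.endswith prev "?"

-- ===== PORT A =====
-- one iteration of A's loop on the already-stripped line s; state = (paragraphs, current_para)
def pvStepA (st : List String × List String) (s : String) : List String × List String :=
  if s = "" then
    if !st.2.isEmpty then (st.1 ++ [PySem.Str.join " " st.2], []) else st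
  else
    if !st.2.isEmpty && pvFirstUpper s && !pvEndsSent (PySem.List.pyGetD st.2 (-1) "") then
      (st.1 ++ [PySem.Str.join " " st.2], [s])
    else
      (st.1, st.2 ++ [s])

def reconstruct_paragraphs_py (text : String) : String :=
  let lines := PySem.Str.splitlines text
  let st := lines.foldl (fun st line => pvStepA st (PySem.Str.strip line)) ([], [])
  let paragraphs := if !st.2.isEmpty then st.1 ++ [PySem.Str.join " " st.2] else st.1
  PySem.Str.join "\n\n" paragraphs

-- ===== PORT B =====
-- _starts_new(prev, cur)
def pvStartsNew (prev cur : String) : Bool := pvFirstUpper cur && !pvEndsSent prev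

-- _split_blocks: state = (blocks, block)
def pvBlocksStep (st : List (List String) × List String) (s : String) :
    List (List String) × List String :=
  if s ≠ "" then (st.1, st.2 ++ [s])
  else if !st.2.isEmpty then (st.1 ++ [st.2], []) else st

def pvSplitBlocks (lines : List String) : List (List String) :=
  let st := lines.foldl pvBlocksStep ([], [])
  if !st.2.isEmpty then st.1 ++ [st.2] else st.1

-- _split_paragraphs: zip(block, block[1:]) pairwise scan; groups[-1].append = dropLast ++ [last ++ [x]]
-- (block[1:] on a list is block.tail)
def pvSplitParas (block : List String) : List String :=
  let groups := (block.zip block.tail).foldl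
    (fun gs p =>
      if pvStartsNew p.1 p.2 then gs ++ [[p.2]]
      else gs.dropLast ++ [gs.getLastD [] ++ [p.2]])
    [[PySem.List.pyGetD block 0 ""]]
  groups.map (PySem.Str.join " ")

def reconstruct_paragraphs_py_alt (text : String) : String :=
  let stripped := (PySem.Str.splitlines text).map PySem.Str.strip
  let paragraphs := (pvSplitBlocks stripped).foldl (fun acc b => acc ++ pvSplitParas b) []
  PySem.Str.join "\n\n" paragraphs

-- ===== PRECONDITION & SPEC =====
def Spec_reconstruct_paragraphs_py (text : String) (out : String) : Prop := out = reconstruct_paragraphs_py_alt text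
instance (text : String) (out : String) : Decidable (Spec_reconstruct_paragraphs_py text out) := by unfold Spec_reconstruct_paragraphs_py; infer_instance

-- ===== CLAIM (what is proved, stated in full; the proofs are below) =====
def Claim_equal_reconstruct_paragraphs_py : Prop := ∀ (text : String), Dom_reconstruct_paragraphs_py text → Spec_reconstruct_paragraphs_py text (reconstruct_paragraphs_py text)

-- ===== LEMMAS AND PROOFS =====

-- small getLastD utilities
theorem pvGetLastD_cons {a : Type} (y : a) (l : List a) (d : a) (h : l ≠ []) :
    (y :: l).getLastD d = l.getLastD d := by
  cases l with
  | nil => simp at h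
  | cons b bs => simp

theorem pvGetLastD_append {a : Type} (l1 l2 : List a) (d : a) (h : l2 ≠ []) :
    (l1 ++ l2).getLastD d = l2.getLastD d := by
  have h2 : l2.getLast? = some (l2.getLast h) := List.getLast?_eq_some_getLast h
  simp [List.getLastD_eq_getLast?, List.getLast?_append_of_ne_nil _ h, h2]

theorem pvDropLast_getLastD {a : Type} (l : List a) (d : a) (h : l ≠ []) :
    l.dropLast ++ [l.getLastD d] = l := by
  have h2 : l.getLast? = some (l.getLast h) := List.getLast?_eq_some_getLast h
  simp [List.getLastD_eq_getLast?, h2, List.dropLast_concat_getLast]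

-- finishing/collecting helpers used only to state the loop invariants
def pvFinishA (st : List String × List String) : List String :=
  if !st.2.isEmpty then st.1 ++ [PySem.Str.join " " st.2] else st.1

def pvFinishB (st : List (List String) × List String) : List (List String) :=
  if !st.2.isEmpty then st.1 ++ [st.2] else st.1

def pvCat (bs : List (List String)) : List String :=
  bs.foldl (fun acc b => acc ++ pvSplitParas b) []

theorem pvCat_acc (l : List (List String)) (acc : List String) :
    l.foldl (fun a b => a ++ pvSplitParas b) acc = acc ++ pvCat l := by
  induction l generalizing acc with
  | nil => simp [pvCat]
  | cons c cs ih =>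
    have hc : pvCat (c :: cs) = pvSplitParas c ++ pvCat cs := by
      rw [pvCat, List.foldl_cons, List.nil_append]; exact ih _
    rw [List.foldl_cons, ih, hc, List.append_assoc]

theorem pvCat_append (bs cs : List (List String)) :
    (bs ++ cs).foldl (fun acc b => acc ++ pvSplitParas b) [] =
      pvCat bs ++ cs.foldl (fun acc b => acc ++ pvSplitParas b) [] := by
  rw [List.foldl_append, pvCat_acc, pvCat_acc cs]
  simp [pvCat_acc, pvCat]

-- canonical chunking of a block into paragraph groups: cur is the open group (nonempty)
def pvChunks (cur : List String) : List String → List (List String)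
  | [] => [cur]
  | y :: ys =>
    if pvStartsNew (cur.getLastD "") y then cur :: pvChunks [y] ys
    else pvChunks (cur ++ [y]) ys

theorem pvChunks_ne_nil (xs : List String) (cur : List String) : pvChunks cur xs ≠ [] := by
  induction xs generalizing cur with
  | nil => simp [pvChunks]
  | cons y ys ih => simp only [pvChunks]; split <;> simp [ih]

-- the last line of the last group is the last line of the block
theorem pvChunks_last_last (xs : List String) (cur : List String) (h : cur ≠ []) :
    ((pvChunks cur xs).getLastD []).getLastD "" = (cur ++ xs).getLastD "" := by
  induction xs generalizing cur with
  | nil => simp [pvChunks]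
  | cons y ys ih =>
    simp only [pvChunks]
    split
    · rw [pvGetLastD_cons _ _ _ (pvChunks_ne_nil ys [y]), ih [y] (by simp),
        pvGetLastD_append cur (y :: ys) "" (by simp)]
      simp
    · rw [ih (cur ++ [y]) (by simp)]
      simp

theorem pvChunks_snoc (xs : List String) (cur : List String) (y : String) (h : cur ≠ []) :
    pvChunks cur (xs ++ [y]) =
      if pvStartsNew ((cur ++ xs).getLastD "") y then pvChunks cur xs ++ [[y]]
      else (pvChunks cur xs).dropLast ++ [(pvChunks cur xs).getLastD [] ++ [y]] := by
  induction xs generalizing cur with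
  | nil =>
    simp only [pvChunks, List.nil_append, List.append_nil]
    split <;> simp [pvChunks]
  | cons z zs ih =>
    simp only [List.cons_append, pvChunks]
    have hlast : (([z] : List String) ++ zs).getLastD "" = (cur ++ z :: zs).getLastD "" := by
      rw [pvGetLastD_append cur (z :: zs) "" (by simp)]
      simp
    split
    · rw [ih [z] (by simp), hlast]
      have hne := pvChunks_ne_nil zs [z]
      split
      · simp
      · rw [List.dropLast_cons_of_ne_nil hne, pvGetLastD_cons _ _ _ hne]
        simp
    · rw [ih (cur ++ [z]) (by simp)]
      simp

-- A's behaviour as a recursive specification over the stripped lines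
mutual
def pvSpecFrom (cur : List String) : List String → List String
  | [] => [PySem.Str.join " " cur]
  | y :: ys =>
    if y = "" then PySem.Str.join " " cur :: pvSpecEmpty ys
    else if pvStartsNew (cur.getLastD "") y then PySem.Str.join " " cur :: pvSpecFrom [y] ys
    else pvSpecFrom (cur ++ [y]) ys

def pvSpecEmpty : List String → List String
  | [] => []
  | y :: ys => if y = "" then pvSpecEmpty ys else pvSpecFrom [y] ys
end

-- B's behaviour with an open (nonempty) block cur and remaining lines
def pvSpecBlock (cur : List String) : List String → List String
  | [] => pvSplitParas cur
  | y :: ys =>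
    if y = "" then pvSplitParas cur ++ pvSpecEmpty ys
    else pvSpecBlock (cur ++ [y]) ys

-- the zip fold inside pvSplitParas computes pvChunks
theorem pvZipFold (xs : List String) (x : String) (gs : List (List String))
    (cur : List String) (hcur : cur ≠ []) (hlast : cur.getLastD "" = x) :
    ((x :: xs).zip xs).foldl
      (fun gs p =>
        if pvStartsNew p.1 p.2 then gs ++ [[p.2]]
        else gs.dropLast ++ [gs.getLastD [] ++ [p.2]])
      (gs ++ [cur]) = gs ++ pvChunks cur xs := by
  induction xs generalizing x gs cur with
  | nil => simp [pvChunks]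
  | cons y ys ih =>
    simp only [List.zip_cons_cons, List.foldl_cons, pvChunks, hlast]
    split
    · rw [show (gs ++ [cur]) ++ [[y]] = (gs ++ [cur]) ++ [[y]] from rfl,
        ih y (gs ++ [cur]) [y] (by simp) (by simp)]
      simp
    · rw [List.dropLast_concat, List.getLastD_concat,
        ih y gs (cur ++ [y]) (by simp) (by rw [pvGetLastD_append cur [y] "" (by simp)]; simp)]

theorem pvSplitParas_eq (x : String) (xs : List String) :
    pvSplitParas (x :: xs) = (pvChunks [x] xs).map (PySem.Str.join " ") := by
  unfold pvSplitParas
  rw [List.tail_cons, PySem.List.pyGetD_zero_cons,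
    show ([[x]] : List (List String)) = [] ++ [[x]] from rfl,
    pvZipFold xs x [] [x] (by simp) (by simp)]
  simp

-- bridge: processing an open block = already-closed groups ++ A-style processing of the open group
theorem pvBridge (ls : List String) (x : String) (xs : List String) :
    pvSpecBlock (x :: xs) ls =
      ((pvChunks [x] xs).dropLast).map (PySem.Str.join " ") ++
        pvSpecFrom ((pvChunks [x] xs).getLastD []) ls := by
  induction ls generalizing x xs with
  | nil =>
    have hne := pvChunks_ne_nil xs [x]
    rw [pvSpecBlock, pvSplitParas_eq, pvSpecFrom]
    conv_lhs => rw [← pvDropLast_getLastD _ [] hne]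
    simp
  | cons y ys ih =>
    have hne := pvChunks_ne_nil xs [x]
    rw [pvSpecBlock, pvSpecFrom]
    by_cases hy : y = ""
    · simp only [hy, if_true, reduceIte]
      rw [pvSplitParas_eq]
      conv_lhs => rw [← pvDropLast_getLastD _ [] hne]
      simp
    · simp only [hy, if_false, reduceIte]
      rw [show (x :: xs) ++ [y] = x :: (xs ++ [y]) from rfl, ih x (xs ++ [y]),
        pvChunks_snoc xs [x] y (by simp), pvChunks_last_last xs [x] (by simp)]
      rw [show (([x] : List String) ++ xs).getLastD "" = (x :: xs).getLastD "" from rfl]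
      split
      · rw [List.dropLast_concat, List.getLastD_concat]
        conv_lhs => rw [← pvDropLast_getLastD (pvChunks [x] xs) [] hne]
        simp
      · rw [List.dropLast_concat, List.getLastD_concat]

-- pyGetD at -1 is getLastD on a nonempty list
theorem pvPyGetD_neg_one (cur : List String) (h : cur ≠ []) :
    PySem.List.pyGetD cur (-1) "" = cur.getLastD "" := by
  have hlen : 1 ≤ cur.length := by
    have := List.length_pos_iff.mpr h; omega
  rw [PySem.List.pyGetD_neg_ofNat cur 1 "" (by omega) hlen]
  have h2 : cur.getLast? = some (cur.getLast h) := List.getLast?_eq_some_getLast h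
  simp [List.getLastD_eq_getLast?, h2]
  exact (List.getLast_eq_getElem h).symm

-- A's fold realises the specification
theorem pvMainA (ls : List String) (P : List String) (cur : List String) :
    pvFinishA (ls.foldl pvStepA (P, cur)) =
      P ++ (if cur.isEmpty then pvSpecEmpty ls else pvSpecFrom cur ls) := by
  induction ls generalizing P cur with
  | nil =>
    cases cur with
    | nil => simp [pvFinishA, pvSpecEmpty]
    | cons c cs => simp [pvFinishA, pvSpecFrom]
  | cons y ys ih =>
    rw [List.foldl_cons]
    by_cases hy : y = ""
    · subst hy
      cases cur with
      | nil => simp [pvStepA, ih, pvSpecEmpty]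
      | cons c cs =>
        simp only [pvStepA, if_true, reduceIte, List.isEmpty_cons, Bool.not_false]
        rw [ih]
        simp [pvSpecFrom]
    · cases cur with
      | nil =>
        simp only [pvStepA, hy, if_false, reduceIte, List.isEmpty_nil, Bool.not_true,
          Bool.false_and, Bool.and_false]
        rw [if_neg (by simp), ih]
        simp [pvSpecEmpty, hy]
      | cons c cs =>
        have hc : (c :: cs : List String) ≠ [] := by simp
        simp only [pvStepA, hy, if_false, reduceIte, List.isEmpty_cons, Bool.not_false,
          Bool.true_and]
        rw [pvPyGetD_neg_one _ hc]
        by_cases hb : pvStartsNew ((c :: cs).getLastD "") y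
        · rw [if_pos (by simp only [pvStartsNew] at hb ⊢; exact hb), ih]
          simp only [pvSpecFrom, hy, if_false, reduceIte, hb, if_true, List.isEmpty_cons]
          simp
        · rw [if_neg (by simp only [pvStartsNew] at hb ⊢; simpa using hb), ih]
          simp only [pvSpecFrom, hy, if_false, reduceIte, hb, List.isEmpty_cons]
          simp

-- B's two-phase pipeline realises the same specification
theorem pvMainB (ls : List String) (bs : List (List String)) (cur : List String) :
    pvCat (pvFinishB (ls.foldl pvBlocksStep (bs, cur))) =
      pvCat bs ++ (if cur.isEmpty then pvSpecEmpty ls else pvSpecBlock cur ls) := by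
  induction ls generalizing bs cur with
  | nil =>
    cases cur with
    | nil => simp [pvFinishB, pvSpecEmpty]
    | cons c cs =>
      simp only [List.foldl_nil, pvFinishB, List.isEmpty_cons, Bool.not_false, if_true,
        List.isEmpty_nil, reduceIte]
      rw [pvCat, pvCat_append]
      simp [pvSpecBlock, pvCat]
  | cons y ys ih =>
    rw [List.foldl_cons]
    by_cases hy : y = ""
    · subst hy
      cases cur with
      | nil => simp [pvBlocksStep, ih, pvSpecEmpty]
      | cons c cs =>
        simp only [pvBlocksStep, reduceIte, List.isEmpty_cons, Bool.not_false, if_true]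
        rw [ih]
        have : pvCat (bs ++ [c :: cs]) = pvCat bs ++ pvSplitParas (c :: cs) := by
          rw [pvCat, pvCat_append]; simp [pvCat]
        simp [this, pvSpecBlock]
    · cases cur with
      | nil =>
        simp only [pvBlocksStep, hy, if_true, reduceIte, List.nil_append]
        rw [ih]
        have hb : pvSpecBlock [y] ys = pvSpecFrom [y] ys := by
          have := pvBridge ys y []
          simpa [pvChunks] using this
        simp [pvSpecEmpty, hy, hb]
      | cons c cs =>
        simp only [pvBlocksStep, hy, if_true, reduceIte]
        rw [ih]
        simp [pvSpecBlock, hy]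

-- ===== VERDICT (by name: the statement is the Claim_ definition above) =====
theorem reconstruct_paragraphs_py_spec : Claim_equal_reconstruct_paragraphs_py := by
  intro text _
  unfold Spec_reconstruct_paragraphs_py reconstruct_paragraphs_py reconstruct_paragraphs_py_alt
    pvSplitBlocks
  show PySem.Str.join "\n\n"
      (pvFinishA (List.foldl (fun st line => pvStepA st (PySem.Str.strip line)) ([], [])
        (PySem.Str.splitlines text))) =
    PySem.Str.join "\n\n"
      (List.foldl (fun acc b => acc ++ pvSplitParas b) []
        (pvFinishB (List.foldl pvBlocksStep ([], [])
          (List.map PySem.Str.strip (PySem.Str.splitlines text)))))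
  rw [← List.foldl_map,
    show ∀ X, List.foldl (fun acc b => acc ++ pvSplitParas b) [] X = pvCat X from fun _ => rfl,
    pvMainA, pvMainB]
  simp [pvCat]
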